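-- pv_equiv track=rewrite | github.com/linamedani/BDD | Mongo/join.py | jointure
-- ===== SOURCE A (Python) =====
-- def jointure(d1, d2, att):
--     resultats_jointure = []  # Liste pour stocker les résultats de jointure
--     for i in d1.keys():
--         for j in d2.keys():
--             if d1[i].get(att) == d2[j].get(att):
--                 resultat = {
--                     'vol_part1': d1[i],
--                     'vol_part2': d2[j],
--                 }
--                 resultats_jointure.append(resultat)
--     return resultats_jointure
-- ===== SOURCE B (Python) =====
-- def jointure(d1, d2, att):
--     # Stage 1: index d2's records by attribute value.
--     buckets = {}
--     for rec in d2.values():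
--         key = rec.get(att)
--         if key in buckets:
--             buckets[key].append(rec)
--         else:
--             buckets[key] = [rec]
--     # Stage 2: one pass over d1 through the index.
--     out = []
--     for rec in d1.values():
--         for mate in buckets.get(rec.get(att), []):
--             out.append({'vol_part1': rec, 'vol_part2': mate})
--     return out
-- ===== Notes on version B (the rewrite author's own statement) =====
-- stated objective: alternative
-- what changed: Replaces A's nested d1 x d2 scan by a two-stage algorithm: first build a hash index of d2's records keyed by attribute value, then a single pass over d1 emits the joined pairs from the matching bucket; the output can itself be quadratic, so the measured wall-clock cost is similar on match-dense inputs.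
import Mathlib
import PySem

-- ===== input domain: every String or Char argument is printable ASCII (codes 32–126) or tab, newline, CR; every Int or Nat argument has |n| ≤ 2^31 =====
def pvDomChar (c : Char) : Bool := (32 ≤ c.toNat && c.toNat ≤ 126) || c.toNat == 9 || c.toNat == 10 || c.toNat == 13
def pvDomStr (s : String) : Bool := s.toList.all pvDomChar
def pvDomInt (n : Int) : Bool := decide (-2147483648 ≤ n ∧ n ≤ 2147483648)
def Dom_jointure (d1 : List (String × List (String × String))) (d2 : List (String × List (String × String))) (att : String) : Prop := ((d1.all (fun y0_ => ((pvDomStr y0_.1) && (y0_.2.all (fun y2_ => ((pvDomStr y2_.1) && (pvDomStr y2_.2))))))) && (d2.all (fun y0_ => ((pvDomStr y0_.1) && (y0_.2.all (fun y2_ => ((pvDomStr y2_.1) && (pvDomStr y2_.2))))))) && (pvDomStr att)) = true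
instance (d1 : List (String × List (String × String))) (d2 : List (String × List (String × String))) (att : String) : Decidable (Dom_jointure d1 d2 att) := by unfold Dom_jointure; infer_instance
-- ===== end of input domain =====

-- B replaces A's nested d1×d2 scan by a two-stage algorithm: index d2 by attribute value, then one pass over d1 (alternative algorithm; similar measured cost, since the output dominates).

-- ===== PORT A =====
-- Python's inner-dict .get(att) in A
def dget (m : List (String × String)) (att : String) : Option String :=
  (PySem.Dict.mk m).get? att

def jointure (d1 : List (String × List (String × String))) (d2 : List (String × List (String × String))) (att : String) : List (List (String × List (String × String))) :=
  d1.foldl (fun acc iv =>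
    d2.foldl (fun acc2 jv =>
      if dget iv.2 att == dget jv.2 att then
        acc2 ++ [[("vol_part1", iv.2), ("vol_part2", jv.2)]]
      else acc2) acc) []

-- ===== PORT B =====
abbrev PVRec := List (String × String)

-- Python's rec.get(att) in B
def bKey (att : String) (r : PVRec) : Option String :=
  (PySem.Dict.mk r).get? att

-- Stage 1 loop: accumulate the index of d2's records keyed by attribute value
def bBuckets (att : String) (acc : PySem.Dict (Option String) (List PVRec)) :
    List (String × PVRec) → PySem.Dict (Option String) (List PVRec)
  | [] => acc
  | (_, r) :: rest =>
      let k := bKey att r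
      -- 'if key in buckets: append else: new singleton' = modify with default []
      bBuckets att (acc.modify k [] (· ++ [r])) rest

-- Stage 2 loop: one pass over d1, emitting the joined pairs from the matching bucket
def bEmit (att : String) (b : PySem.Dict (Option String) (List PVRec)) :
    List (String × PVRec) → List (List (String × PVRec))
  | [] => []
  | (_, r) :: rest =>
      ((b.getD (bKey att r) []).map (fun mate => [("vol_part1", r), ("vol_part2", mate)]))
        ++ bEmit att b rest

def jointure_alt (d1 : List (String × List (String × String))) (d2 : List (String × List (String × String))) (att : String) : List (List (String × List (String × String))) :=
  bEmit att (bBuckets att PySem.Dict.empty d2) d1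

-- ===== PRECONDITION & SPEC =====
def Spec_jointure (d1 : List (String × List (String × String))) (d2 : List (String × List (String × String))) (att : String) (out : List (List (String × List (String × String)))) : Prop := out = jointure_alt d1 d2 att
instance (d1 : List (String × List (String × String))) (d2 : List (String × List (String × String))) (att : String) (out : List (List (String × List (String × String)))) : Decidable (Spec_jointure d1 d2 att out) := by unfold Spec_jointure; infer_instance

-- ===== CLAIM =====
def Claim_equal_jointure : Prop := ∀ (d1 : List (String × List (String × String))) (d2 : List (String × List (String × String))) (att : String), Dom_jointure d1 d2 att → Spec_jointure d1 d2 att (jointure d1 d2 att)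

-- ===== LEMMAS AND PROOFS =====

theorem bKey_eq_dget (att : String) (r : PVRec) : bKey att r = dget r att := rfl

theorem bBuckets_eq_foldl (att : String) (l : List (String × PVRec))
    (acc : PySem.Dict (Option String) (List PVRec)) :
    bBuckets att acc l
      = l.foldl (fun b jv => b.modify (dget jv.2 att) [] (· ++ [jv.2])) acc := by
  induction l generalizing acc with
  | nil => rfl
  | cons h t ih => simp [bBuckets, bKey_eq_dget, ih]

theorem bEmit_eq_flatMap (att : String) (b : PySem.Dict (Option String) (List PVRec))
    (l : List (String × PVRec)) :
    bEmit att b l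
      = l.flatMap (fun iv =>
          (b.getD (dget iv.2 att) []).map
            (fun v2 => [("vol_part1", iv.2), ("vol_part2", v2)])) := by
  induction l with
  | nil => rfl
  | cons h t ih => simp [bEmit, bKey_eq_dget, ih]

-- B's bucket for key k holds exactly d2's records whose attribute value is k, in order.
theorem bucket_eq (d2 : List (String × List (String × String))) (att : String) (k : Option String) :
    (d2.foldl (fun b jv => b.modify (dget jv.2 att) [] (· ++ [jv.2])) PySem.Dict.empty).getD k []
      = (d2.filter (fun jv => dget jv.2 att == k)).map (·.2) := by
  have h1 : (d2.map (fun jv => (dget jv.2 att, jv.2))).foldl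
      (fun d p => d.modify p.1 [] (· ++ [p.2])) PySem.Dict.empty
      = d2.foldl (fun b jv => b.modify (dget jv.2 att) [] (· ++ [jv.2])) PySem.Dict.empty := by
    rw [List.foldl_map]
  rw [← h1, PySem.Dict.getD_foldl_modify_append]
  simp only [List.filter_map, PySem.Dict.getD_empty, List.map_map, List.nil_append]
  rfl

-- ===== VERDICT =====
theorem jointure_spec : Claim_equal_jointure := by
  intro d1 d2 att _
  unfold Spec_jointure jointure jointure_alt
  rw [bBuckets_eq_foldl, bEmit_eq_flatMap]
  simp only [bucket_eq, PySem.List.foldl_append_if, PySem.List.foldl_append_eq_flatMap,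
    List.nil_append]
  apply List.flatMap_congr
  intro iv _
  rw [List.map_map]
  apply congrArg
  apply List.filter_congr
  intro jv _
  exact Bool.beq_comm
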